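-- pv_equiv track=rewrite | github.com/alenaks/SigmaPie | src/sigmapie/mtsl_class.py | gather_grammars
-- ===== SOURCE A (Python) =====
-- def gather_grammars(grammar):
--     """Gathers grammars with the same tier together.
--
--     Arguments:
--         grammar (list): a representation of the learned grammar
--             where there is a one-to-one mapping between tiers
--             and bigrams.
--     Returns:
--         dict: a dictionary where keys are tiers and values are
--             the restrictions imposed on those tiers.
--     """
--     G = {}
--     for i in grammar:
--         if tuple(i[0]) in G:
--             G[tuple(i[0])] += [i[1]]
--         else:
--             G[tuple(i[0])] = [i[1]]
--     return G
-- ===== SOURCE B (Python) =====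
-- def gather_grammars(grammar):
--     """Gathers grammars with the same tier together (two-pass: ordered
--     distinct tiers, then one value-collecting comprehension per tier)."""
--     tiers = []
--     for i in grammar:
--         t = tuple(i[0])
--         if t not in tiers:
--             tiers.append(t)
--     return {t: [i[1] for i in grammar if tuple(i[0]) == t] for t in tiers}
-- ===== Notes on version B (the rewrite author's own statement) =====
-- stated objective: alternative
-- what changed: Replaces A's single pass that grows dict entries in place by a two-pass scheme: first collect the distinct tier keys in first-occurrence order, then build each tier's value list with a filtering comprehension over the whole grammar.
import Mathlib
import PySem

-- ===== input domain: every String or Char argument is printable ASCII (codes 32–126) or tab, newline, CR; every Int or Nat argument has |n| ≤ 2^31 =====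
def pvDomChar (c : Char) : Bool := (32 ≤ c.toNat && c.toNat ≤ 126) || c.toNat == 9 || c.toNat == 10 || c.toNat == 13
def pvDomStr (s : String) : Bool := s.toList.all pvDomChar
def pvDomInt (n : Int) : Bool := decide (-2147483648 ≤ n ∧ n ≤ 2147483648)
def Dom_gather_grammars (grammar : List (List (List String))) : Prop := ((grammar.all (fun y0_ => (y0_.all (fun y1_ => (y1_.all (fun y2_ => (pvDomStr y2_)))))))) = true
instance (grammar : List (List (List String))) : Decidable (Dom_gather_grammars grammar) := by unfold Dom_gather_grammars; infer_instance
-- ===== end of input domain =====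

-- B groups by tier in two passes (ordered distinct tiers, then a per-tier filter) instead of A's single dict-growing pass; equal output, alternative structure.


-- ===== PORT A =====
-- G = {}; for i in grammar: if tuple(i[0]) in G: G[tuple(i[0])] += [i[1]] else: G[tuple(i[0])] = [i[1]]; return G
def gather_grammars (grammar : List (List (List String))) : List (List String × List (List String)) :=
  (grammar.foldl
    (fun (G : PySem.Dict (List String) (List (List String))) i =>
      if G.contains ((PySem.List.pyGet? i 0).getD []) then
        G.insert ((PySem.List.pyGet? i 0).getD [])
          (G.getD ((PySem.List.pyGet? i 0).getD []) [] ++ [(PySem.List.pyGet? i 1).getD []])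
      else
        G.insert ((PySem.List.pyGet? i 0).getD []) [(PySem.List.pyGet? i 1).getD []])
    PySem.Dict.empty).items

-- ===== PORT B =====
-- tiers = []; for i in grammar: t = tuple(i[0]); if t not in tiers: tiers.append(t)
-- return {t: [i[1] for i in grammar if tuple(i[0]) == t] for t in tiers}
def gather_grammars_alt (grammar : List (List (List String))) : List (List String × List (List String)) :=
  let tiers : PySem.Set (List String) :=
    grammar.foldl (fun ks i => PySem.Set.add ks ((PySem.List.pyGet? i 0).getD [])) []
  tiers.map (fun t =>
    (t, (grammar.filter (fun i => (PySem.List.pyGet? i 0).getD [] == t)).map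
          (fun i => (PySem.List.pyGet? i 1).getD [])))

-- ===== PRECONDITION & SPEC =====
-- Pre_ excludes exactly the entries on which Python's i[0] / i[1] raises IndexError (A and B both raise there).
def Pre_gather_grammars (grammar : List (List (List String))) : Prop :=
  ∀ i ∈ grammar, 2 ≤ i.length
instance (grammar : List (List (List String))) : Decidable (Pre_gather_grammars grammar) := by unfold Pre_gather_grammars; infer_instance
def pvWitness_gather_grammars : List (List (List String)) :=
  [[["a"], ["x", "y"]], [["b"], ["z"]], [["a"], ["w"]]]
def Spec_gather_grammars (grammar : List (List (List String))) (out : List (List String × List (List String))) : Prop := out = gather_grammars_alt grammar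
instance (grammar : List (List (List String))) (out : List (List String × List (List String))) : Decidable (Spec_gather_grammars grammar out) := by unfold Spec_gather_grammars; infer_instance

-- ===== CLAIM (what is proved, stated in full; the proofs are below) =====
def Claim_equal_gather_grammars : Prop := ∀ (grammar : List (List (List String))), Dom_gather_grammars grammar → Pre_gather_grammars grammar → Spec_gather_grammars grammar (gather_grammars grammar)

-- ===== LEMMAS AND PROOFS =====

-- A's loop body is exactly Dict.modify with default [] and f = (· ++ [i[1]]).
theorem gg_step_eq_modify (G : PySem.Dict (List String) (List (List String)))
    (k : List String) (v : List String) :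
    (if G.contains k then G.insert k (G.getD k [] ++ [v]) else G.insert k [v])
      = G.modify k [] (fun vs => vs ++ [v]) := by
  simp [PySem.Dict.modify, PySem.Dict.getD_eq_get?_getD]
  rcases h : G.get? k with _ | vs
  · simp [PySem.Dict.contains_eq_isSome_get?, h]
  · simp [PySem.Dict.contains_eq_isSome_get?, h]

-- ===== VERDICT (by name: the statement is the Claim_ definition above) =====
theorem gather_grammars_spec : Claim_equal_gather_grammars := by
  intro grammar _ _
  show gather_grammars grammar = gather_grammars_alt grammar
  unfold gather_grammars gather_grammars_alt
  -- rewrite A's fold as a modify-fold over key/value pairs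
  have hstep :
      grammar.foldl
        (fun (G : PySem.Dict (List String) (List (List String))) i =>
          if G.contains ((PySem.List.pyGet? i 0).getD []) then
            G.insert ((PySem.List.pyGet? i 0).getD [])
              (G.getD ((PySem.List.pyGet? i 0).getD []) [] ++ [(PySem.List.pyGet? i 1).getD []])
          else
            G.insert ((PySem.List.pyGet? i 0).getD []) [(PySem.List.pyGet? i 1).getD []])
        PySem.Dict.empty
      = (grammar.map (fun i => ((PySem.List.pyGet? i 0).getD [], (PySem.List.pyGet? i 1).getD []))).foldl
          (fun d p => d.modify p.1 [] (fun vs => vs ++ [p.2])) PySem.Dict.empty := by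
    rw [List.foldl_map]
    exact PySem.List.foldl_congr_mem _ _ _ _ (fun G i hi => gg_step_eq_modify G _ _)
  rw [hstep]
  set l := grammar.map (fun i => ((PySem.List.pyGet? i 0).getD [], (PySem.List.pyGet? i 1).getD [])) with hl
  set d := l.foldl (fun d p => d.modify p.1 [] (fun vs => vs ++ [p.2])) PySem.Dict.empty with hd
  -- keys of the dict = distinct tier keys in first-occurrence order
  have hkeys : d.keys = PySem.Set.ofList (grammar.map (fun i => (PySem.List.pyGet? i 0).getD [])) := by
    rw [hd, PySem.Dict.keys_foldl_modify_key]
    simp [PySem.Dict.keys_empty, PySem.Set.update_nil_left, hl, List.map_map, Function.comp_def]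
  have hnd : d.keys.Nodup := by
    rw [hkeys]; exact PySem.Set.nodup_ofList _
  -- B's tiers accumulator is the same ordered dedup
  have htiers : grammar.foldl (fun ks i => PySem.Set.add ks ((PySem.List.pyGet? i 0).getD [])) []
      = PySem.Set.ofList (grammar.map (fun i => (PySem.List.pyGet? i 0).getD [])) := by
    rw [← PySem.Set.update_map_eq_foldl_add, PySem.Set.update_nil_left]
  rw [PySem.Dict.items_eq_map_keys d hnd [], hkeys, htiers]
  refine List.map_congr_left (fun t _ => ?_)
  -- the value stored under t is the filtered list of restrictions
  have hv : d.getD t [] = (l.filter (fun p => p.1 == t)).map (·.2) := by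
    rw [hd, PySem.Dict.getD_foldl_modify_append]
    simp
  rw [hv, hl, List.filter_map, List.map_map]
  simp [Function.comp_def]
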